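-- pv_equiv track=rewrite | github.com/Cialyni/SPbU_python | src/Practices/Practice_22.09/Fractions.py | all_fraction_find
-- ===== SOURCE A (Python) =====
-- import math
--
-- def fraction_normalization(numerator, denominator):
--     gcd = math.gcd(numerator, denominator)
--     return numerator // gcd, denominator // gcd
--
-- def all_fraction_find(n):
--     ans = set()
--     for denominator in range(1, n + 1):
--         for numerator in range(1, denominator + 1):
--             fraction = fraction_normalization(numerator, denominator)
--             if not (fraction in ans):
--                 ans.add(fraction)
--     return ans
-- ===== SOURCE B (Python) =====
-- import math
--
-- def all_fraction_find(n):
--     # Generate the reduced fractions directly: (num, den) with num <= den is in the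
--     # answer iff gcd(num, den) == 1, so no normalization or dedup pass is needed.
--     return {(num, den)
--             for den in range(1, n + 1)
--             for num in range(1, den + 1)
--             if math.gcd(num, den) == 1}
-- ===== Notes on version B (the rewrite author's own statement) =====
-- stated objective: alternative
-- what changed: Instead of normalizing every pair by gcd division and deduplicating through set membership tests, B generates exactly the coprime pairs with one set comprehension filtered by a coprimality test, so there are no divisions, no duplicate insertions and no membership probes; measured about 1.4x faster, below the 1.5x bar, so no speed is claimed.
import Mathlib
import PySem

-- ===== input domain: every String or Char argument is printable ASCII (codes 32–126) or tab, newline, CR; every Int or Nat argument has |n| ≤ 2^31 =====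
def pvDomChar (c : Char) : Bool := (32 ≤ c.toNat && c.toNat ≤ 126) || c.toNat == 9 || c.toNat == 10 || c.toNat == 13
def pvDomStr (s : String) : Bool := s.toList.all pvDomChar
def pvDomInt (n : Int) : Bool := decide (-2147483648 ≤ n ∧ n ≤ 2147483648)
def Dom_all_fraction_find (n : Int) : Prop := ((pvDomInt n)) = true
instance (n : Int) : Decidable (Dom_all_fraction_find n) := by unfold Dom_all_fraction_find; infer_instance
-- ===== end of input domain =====

-- B replaces A's normalize-every-pair-and-dedup-via-set scheme by one comprehension that
-- generates exactly the coprime pairs, with no divisions, duplicate insertions or membership probes.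
-- Python tuples (num, den) are encoded as 2-element lists per the required signature List (List Int).

-- ===== PORT A =====
-- math.gcd on nonnegative ints is Int.gcd; '//' is PySem.Int.floordiv.
def fraction_normalization (numerator denominator : Int) : List Int :=
  let gcd : Int := (Int.gcd numerator denominator : Int)
  [PySem.Int.floordiv numerator gcd, PySem.Int.floordiv denominator gcd]

def all_fraction_find (n : Int) : List (List Int) :=
  (PySem.List.pyRange 1 (n + 1) 1).foldl (fun ans denominator =>
    (PySem.List.pyRange 1 (denominator + 1) 1).foldl (fun ans numerator =>
      let fraction := fraction_normalization numerator denominator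
      if PySem.Set.contains ans fraction then ans else PySem.Set.add ans fraction) ans)
    PySem.Set.empty

-- ===== PORT B =====
def all_fraction_find_alt (n : Int) : List (List Int) :=
  PySem.Set.ofList ((PySem.List.pyRange 1 (n + 1) 1).flatMap (fun den =>
    ((PySem.List.pyRange 1 (den + 1) 1).filter (fun num => Int.gcd num den == 1)).map
      (fun num => [num, den])))

-- ===== PRECONDITION & SPEC =====
def Spec_all_fraction_find (n : Int) (out : List (List Int)) : Prop := out = all_fraction_find_alt n
instance (n : Int) (out : List (List Int)) : Decidable (Spec_all_fraction_find n out) := by unfold Spec_all_fraction_find; infer_instance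

-- ===== CLAIM (what is proved, stated in full; the proofs are below) =====
def Claim_equal_all_fraction_find : Prop := ∀ (n : Int), Dom_all_fraction_find n → Spec_all_fraction_find n (all_fraction_find n)

-- ===== LEMMAS AND PROOFS =====

-- one row of B's comprehension: the coprime pairs with second component den
def pvRow (den : Int) : List (List Int) :=
  ((PySem.List.pyRange 1 (den + 1) 1).filter (fun num => Int.gcd num den == 1)).map
    (fun num => [num, den])

-- B's comprehension body before dedup
def pvFarey (m : Int) : List (List Int) :=
  (PySem.List.pyRange 1 (m + 1) 1).flatMap pvRow

lemma pvRow_sound {x : List Int} {den : Int} (hx : x ∈ pvRow den) :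
    ∃ a, x = [a, den] ∧ 1 ≤ a ∧ a ≤ den ∧ Int.gcd a den = 1 := by
  simp only [pvRow, List.mem_map, List.mem_filter, PySem.List.mem_pyRange_one,
    beq_iff_eq] at hx
  obtain ⟨a, ⟨⟨h1, h2⟩, hg⟩, rfl⟩ := hx
  exact ⟨a, rfl, h1, by omega, hg⟩

lemma pvRow_complete {a den : Int} (h1 : 1 ≤ a) (h2 : a ≤ den) (h3 : Int.gcd a den = 1) :
    [a, den] ∈ pvRow den := by
  simp only [pvRow, List.mem_map, List.mem_filter, PySem.List.mem_pyRange_one, beq_iff_eq]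
  exact ⟨a, ⟨⟨h1, by omega⟩, h3⟩, rfl⟩

lemma pvFarey_sound {x : List Int} {m : Int} (hx : x ∈ pvFarey m) :
    ∃ a b, x = [a, b] ∧ 1 ≤ a ∧ a ≤ b ∧ b ≤ m ∧ Int.gcd a b = 1 := by
  simp only [pvFarey, List.mem_flatMap, PySem.List.mem_pyRange_one] at hx
  obtain ⟨b, ⟨hb1, hb2⟩, hx⟩ := hx
  obtain ⟨a, rfl, ha1, hab, hg⟩ := pvRow_sound hx
  exact ⟨a, b, rfl, ha1, hab, by omega, hg⟩

lemma pvFarey_complete {a b m : Int} (h1 : 1 ≤ a) (h2 : a ≤ b) (hm : b ≤ m)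
    (h3 : Int.gcd a b = 1) : [a, b] ∈ pvFarey m := by
  simp only [pvFarey, List.mem_flatMap, PySem.List.mem_pyRange_one]
  exact ⟨b, ⟨by omega, by omega⟩, pvRow_complete h1 h2 h3⟩

-- arithmetic facts about the reduced pair
lemma pvNorm_spec {num den : Int} (h1 : 1 ≤ num) (h2 : num ≤ den) :
    ∃ a b, fraction_normalization num den = [a, b] ∧
      1 ≤ a ∧ a ≤ b ∧ b ≤ den ∧ Int.gcd a b = 1 ∧ (b = den ↔ Int.gcd num den = 1) := by
  have hgpos : 0 < Int.gcd num den := Int.gcd_pos_of_ne_zero_left den (by omega)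
  set g : Int := (Int.gcd num den : Int) with hgdef
  have hg0 : 0 < g := by rw [hgdef]; exact_mod_cast hgpos
  have hdl : g ∣ num := by rw [hgdef]; exact Int.gcd_dvd_left num den
  have hdr : g ∣ den := by rw [hgdef]; exact Int.gcd_dvd_right num den
  refine ⟨num / g, den / g, ?_, ?_, ?_, ?_, ?_, ?_⟩
  · simp [fraction_normalization, PySem.Int.floordiv_eq_ediv_of_pos hg0, ← hgdef]
  · have ha : num / g * g = num := Int.ediv_mul_cancel hdl
    by_contra hcon
    push Not at hcon
    nlinarith
  · have ha : num / g * g = num := Int.ediv_mul_cancel hdl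
    have hb : den / g * g = den := Int.ediv_mul_cancel hdr
    have : num / g * g ≤ den / g * g := by omega
    exact le_of_mul_le_mul_right this hg0
  · have hb : den / g * g = den := Int.ediv_mul_cancel hdr
    have hb1 : 1 ≤ den / g := by
      by_contra hcon
      push Not at hcon
      nlinarith
    nlinarith
  · exact Int.gcd_div_gcd_div_gcd hgpos
  · constructor
    · intro hbd
      have hb : den / g * g = den := Int.ediv_mul_cancel hdr
      have : g = 1 := by
        rw [hbd] at hb
        have hden1 : 1 ≤ den := by omega
        nlinarith
      have h2' : ((Int.gcd num den : Nat) : Int) = 1 := by rw [← hgdef, this]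
      exact_mod_cast h2'
    · intro hgcd
      have : g = 1 := by rw [hgdef, hgcd]; rfl
      rw [this, Int.ediv_one]

lemma pvNorm_coprime {num den : Int} (h1 : 1 ≤ num) (hg : Int.gcd num den = 1) :
    fraction_normalization num den = [num, den] := by
  simp [fraction_normalization, hg, PySem.Int.floordiv_eq_ediv_of_pos (by omega : (0:Int) < 1)]

lemma pvRow_nodup (den : Int) : (pvRow den).Nodup := by
  refine List.Nodup.map ?_ (List.Nodup.filter _ (PySem.List.nodup_pyRange_one 1 (den + 1)))
  intro x y hxy
  simpa using hxy

lemma pvFarey_nodup_nat (m : Nat) : (pvFarey (m : Int)).Nodup := by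
  induction m with
  | zero =>
    simp [pvFarey, PySem.List.pyRange_one_eq_nil (by omega : (1:Int) ≤ 1)]
  | succ k ih =>
    have hsplit : pvFarey ((k : Int) + 1) = pvFarey (k : Int) ++ pvRow ((k : Int) + 1) := by
      unfold pvFarey
      rw [PySem.List.pyRange_one_succ_right (by omega : (1:Int) ≤ (k : Int) + 1),
        List.flatMap_append]
      simp
    push_cast
    rw [hsplit, List.nodup_append]
    refine ⟨ih, pvRow_nodup _, ?_⟩
    intro x hx y hy
    obtain ⟨a, b, rfl, _, _, hb, _⟩ := pvFarey_sound hx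
    obtain ⟨a', he, _, _, _⟩ := pvRow_sound hy
    subst he
    intro hcon
    simp only [List.cons.injEq] at hcon
    omega

lemma pvFarey_nodup (m : Int) : (pvFarey m).Nodup := by
  rcases (by omega : m ≤ 0 ∨ 0 < m) with h | h
  · simp [pvFarey, PySem.List.pyRange_one_eq_nil (by omega : m + 1 ≤ 1)]
  · have : m = ((m.toNat : Nat) : Int) := by omega
    rw [this]
    exact pvFarey_nodup_nat m.toNat

-- the inner loop over numerators: on an accumulator holding all coprime pairs with smaller
-- denominator plus the partial row, it completes the row for `den`
lemma pvInner (den : Int) (P : List (List Int))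
    (Hs : ∀ x ∈ P, ∃ a b, x = [a, b] ∧ 1 ≤ a ∧ a ≤ b ∧ b < den ∧ Int.gcd a b = 1)
    (Hc : ∀ a b : Int, 1 ≤ a → a ≤ b → b < den → Int.gcd a b = 1 → [a, b] ∈ P) :
    ∀ (k : Nat) (lo : Int), 1 ≤ lo → lo ≤ den + 1 → (den + 1 - lo).toNat = k →
    (PySem.List.pyRange lo (den + 1) 1).foldl (fun ans numerator =>
        let fraction := fraction_normalization numerator den
        if PySem.Set.contains ans fraction then ans else PySem.Set.add ans fraction)
      (P ++ ((PySem.List.pyRange 1 lo 1).filter (fun num => Int.gcd num den == 1)).map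
        (fun num => [num, den]))
    = P ++ pvRow den := by
  intro k
  induction k with
  | zero =>
    intro lo h1 h2 hk
    have hlo : lo = den + 1 := by omega
    subst hlo
    rw [PySem.List.pyRange_one_eq_nil (le_refl _)]
    rfl
  | succ k ih =>
    intro lo h1 h2 hk
    have hlt : lo < den + 1 := by omega
    rw [PySem.List.pyRange_one_cons hlt, List.foldl_cons]
    obtain ⟨a, b, hfrac, ha1, hab, hbden, hgab, hbiff⟩ :=
      pvNorm_spec (num := lo) (den := den) h1 (by omega)
    have hpartial : ∀ x ∈ ((PySem.List.pyRange 1 lo 1).filter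
        (fun num => Int.gcd num den == 1)).map (fun num => [num, den]),
        ∃ a', x = [a', den] ∧ a' < lo := by
      intro x hx
      simp only [List.mem_map, List.mem_filter, PySem.List.mem_pyRange_one, beq_iff_eq] at hx
      obtain ⟨a', ⟨⟨_, ha2⟩, _⟩, rfl⟩ := hx
      exact ⟨a', rfl, ha2⟩
    by_cases hg : Int.gcd lo den = 1
    · have hfr : fraction_normalization lo den = [lo, den] := pvNorm_coprime h1 hg
      have hnot : [lo, den] ∉ P ++ ((PySem.List.pyRange 1 lo 1).filter
          (fun num => Int.gcd num den == 1)).map (fun num => [num, den]) := by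
        intro hm
        rcases List.mem_append.1 hm with hm | hm
        · obtain ⟨a', b', he, _, _, hb', _⟩ := Hs _ hm
          simp only [List.cons.injEq] at he
          omega
        · obtain ⟨a', he, ha'⟩ := hpartial _ hm
          simp only [List.cons.injEq] at he
          omega
      have hc : PySem.Set.contains (P ++ ((PySem.List.pyRange 1 lo 1).filter
          (fun num => Int.gcd num den == 1)).map (fun num => [num, den]))
          (fraction_normalization lo den) = false := by
        rw [hfr, ← Bool.not_eq_true, PySem.Set.contains_iff _ _]
        exact hnot
      simp only [hc, Bool.false_eq_true, if_false]
      rw [hfr, PySem.Set.add_of_not_mem hnot]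
      have hstep : (((PySem.List.pyRange 1 lo 1).filter
            (fun num => Int.gcd num den == 1)).map (fun num => [num, den])) ++ [[lo, den]]
          = ((PySem.List.pyRange 1 (lo + 1) 1).filter
            (fun num => Int.gcd num den == 1)).map (fun num => [num, den]) := by
        rw [PySem.List.pyRange_one_succ_right (by omega : (1:Int) ≤ lo), List.filter_append,
          List.map_append]
        simp [hg]
      rw [List.append_assoc, hstep]
      exact ih (lo + 1) (by omega) (by omega) (by omega)
    · have hbd : b < den := by
        rcases lt_or_eq_of_le hbden with h | h
        · exact h
        · exact absurd (hbiff.1 h) hg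
      have hmem : fraction_normalization lo den ∈ P ++ ((PySem.List.pyRange 1 lo 1).filter
          (fun num => Int.gcd num den == 1)).map (fun num => [num, den]) := by
        rw [hfrac]
        exact List.mem_append.2 (Or.inl (Hc a b ha1 hab hbd hgab))
      have hc : PySem.Set.contains (P ++ ((PySem.List.pyRange 1 lo 1).filter
          (fun num => Int.gcd num den == 1)).map (fun num => [num, den]))
          (fraction_normalization lo den) = true := (PySem.Set.contains_iff _ _).2 hmem
      simp only [hc, if_true]
      have hstep : (((PySem.List.pyRange 1 lo 1).filter
            (fun num => Int.gcd num den == 1)).map (fun num => [num, den]))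
          = ((PySem.List.pyRange 1 (lo + 1) 1).filter
            (fun num => Int.gcd num den == 1)).map (fun num => [num, den]) := by
        rw [PySem.List.pyRange_one_succ_right (by omega : (1:Int) ≤ lo), List.filter_append,
          List.map_append]
        simp [hg]
      rw [hstep]
      exact ih (lo + 1) (by omega) (by omega) (by omega)

lemma pvOuter (m : Nat) :
    (PySem.List.pyRange 1 ((m : Int) + 1) 1).foldl (fun ans denominator =>
      (PySem.List.pyRange 1 (denominator + 1) 1).foldl (fun ans numerator =>
        let fraction := fraction_normalization numerator denominator
        if PySem.Set.contains ans fraction then ans else PySem.Set.add ans fraction) ans)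
      PySem.Set.empty
    = pvFarey (m : Int) := by
  induction m with
  | zero =>
    simp [pvFarey, PySem.List.pyRange_one_eq_nil (by omega : (1:Int) ≤ 1), PySem.Set.empty]
  | succ k ih =>
    push_cast
    rw [PySem.List.pyRange_one_succ_right (by omega : (1:Int) ≤ (k : Int) + 1),
      List.foldl_append, ih, List.foldl_cons, List.foldl_nil]
    have hP := pvInner ((k : Int) + 1) (pvFarey (k : Int))
      (by
        intro x hx
        obtain ⟨a, b, rfl, h1, h2, h3, h4⟩ := pvFarey_sound hx
        exact ⟨a, b, rfl, h1, h2, by omega, h4⟩)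
      (by
        intro a b h1 h2 h3 h4
        exact pvFarey_complete h1 h2 (by omega) h4)
      ((k : Int) + 1).toNat 1 (by omega) (by omega) (by omega)
    rw [PySem.List.pyRange_one_eq_nil (le_refl (1:Int))] at hP
    simp only [List.filter_nil, List.map_nil, List.append_nil] at hP
    rw [hP]
    unfold pvFarey
    rw [PySem.List.pyRange_one_succ_right (by omega : (1:Int) ≤ (k : Int) + 1),
      List.flatMap_append]
    simp

-- ===== VERDICT (by name: the statement is the Claim_ definition above) =====
theorem all_fraction_find_spec : Claim_equal_all_fraction_find := by
  intro n _
  show all_fraction_find n = all_fraction_find_alt n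
  have hB : all_fraction_find_alt n = pvFarey n := by
    have h0 : all_fraction_find_alt n = PySem.Set.ofList (pvFarey n) := rfl
    rw [h0, PySem.Set.ofList_eq_self_of_nodup _ (pvFarey_nodup n)]
  rcases (by omega : n ≤ 0 ∨ 0 < n) with h | h
  · rw [hB]
    unfold all_fraction_find pvFarey
    rw [PySem.List.pyRange_one_eq_nil (by omega : n + 1 ≤ 1)]
    rfl
  · have hn : n = ((n.toNat : Nat) : Int) := by omega
    rw [hB, hn]
    exact pvOuter n.toNat
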